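-- pv_equiv track=rewrite | github.com/pultar/ase | ase/clease/concentration.py | _num_elements_with_var
-- ===== SOURCE A (Python) =====
-- def _num_elements_with_var(variable_range, element_conc):
--     # count how many elements have their concentration specified with
--     # the passed variable.
--     num_elements_with_variable = {k: 0 for k in variable_range.keys()}
--     for var in variable_range.keys():
--         for basis_elem in element_conc:
--             for _, conc in basis_elem.items():
--                 if var in conc:
--                     num_elements_with_variable[var] += 1
--     return num_elements_with_variable
-- ===== SOURCE B (Python) =====
-- def _num_elements_with_var(variable_range, element_conc):
--     # Two stages: (1) tally how often each string appears as a (distinct)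
--     # member of some conc; (2) read off the tally for each variable key.
--     tally = {}
--     for basis_elem in element_conc:
--         for conc in basis_elem.values():
--             for member in dict.fromkeys(conc):
--                 tally[member] = tally.get(member, 0) + 1
--     return {k: tally.get(k, 0) for k in variable_range}
-- ===== Notes on version B (the rewrite author's own statement) =====
-- stated objective: faster
-- what changed: Replaced A's per-variable rescans (outer loop over variables, full data scan with 'var in conc' each time) by a two-stage plan: one pass builds a tally dict over all distinct conc members, then the result is read off by a lookup per variable key.
import Mathlib
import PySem

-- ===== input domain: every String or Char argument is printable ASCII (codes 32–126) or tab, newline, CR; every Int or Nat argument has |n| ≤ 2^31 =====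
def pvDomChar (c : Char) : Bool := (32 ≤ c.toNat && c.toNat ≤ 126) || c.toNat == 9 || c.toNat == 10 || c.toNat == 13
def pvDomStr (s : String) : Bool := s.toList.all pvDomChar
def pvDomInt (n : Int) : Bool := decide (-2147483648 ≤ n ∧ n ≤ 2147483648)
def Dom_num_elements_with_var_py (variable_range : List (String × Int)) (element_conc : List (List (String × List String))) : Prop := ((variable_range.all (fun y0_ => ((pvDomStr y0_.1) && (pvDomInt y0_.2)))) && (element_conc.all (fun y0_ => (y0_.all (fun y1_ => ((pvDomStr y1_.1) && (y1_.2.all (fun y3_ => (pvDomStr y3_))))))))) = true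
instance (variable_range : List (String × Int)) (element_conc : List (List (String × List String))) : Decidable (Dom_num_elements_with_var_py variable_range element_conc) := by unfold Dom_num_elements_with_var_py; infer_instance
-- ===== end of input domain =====

-- B replaces A's per-variable rescans of the data with a two-stage plan: one tallying
-- pass over all distinct conc members, then a lookup per variable key (objective: faster).

-- ===== PORT A =====
-- A: init all variable keys to 0; then for each variable key, scan every (elem, conc)
-- item of every basis dict and increment that variable's count when 'var in conc'.
def num_elements_with_var_py (variable_range : List (String × Int)) (element_conc : List (List (String × List String))) : List (String × Int) :=
  let vr : PySem.Dict String Int := PySem.Dict.ofList variable_range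
  -- {k: 0 for k in variable_range.keys()}
  let init : PySem.Dict String Int :=
    vr.keys.foldl (fun d k => d.insert k 0) PySem.Dict.empty
  let res : PySem.Dict String Int :=
    vr.keys.foldl (fun d var =>
      element_conc.foldl (fun d basis_elem =>
        (PySem.Dict.ofList basis_elem).items.foldl (fun d p =>
          -- if var in conc: num_elements_with_variable[var] += 1
          if var ∈ p.2 then d.insert var (d.getD var 0 + 1) else d) d) d) init
  res.items

-- ===== PORT B =====
-- B stage 1: tally[member] = tally.get(member, 0) + 1 for each distinct member of each conc;
-- B stage 2: {k: tally.get(k, 0) for k in variable_range}.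
def num_elements_with_var_py_alt (variable_range : List (String × Int)) (element_conc : List (List (String × List String))) : List (String × Int) :=
  let tally : PySem.Dict String Int :=
    element_conc.foldl (fun t basis_elem =>
      (PySem.Dict.ofList basis_elem).values.foldl (fun t conc =>
        (PySem.Set.ofList conc).foldl (fun t member =>
          t.insert member (t.getD member 0 + 1)) t) t)
      PySem.Dict.empty
  (PySem.Dict.ofList variable_range).keys.map (fun k => (k, tally.getD k 0))

-- ===== PRECONDITION & SPEC =====
def Spec_num_elements_with_var_py (variable_range : List (String × Int)) (element_conc : List (List (String × List String))) (out : List (String × Int)) : Prop := out = num_elements_with_var_py_alt variable_range element_conc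
instance (variable_range : List (String × Int)) (element_conc : List (List (String × List String))) (out : List (String × Int)) : Decidable (Spec_num_elements_with_var_py variable_range element_conc out) := by unfold Spec_num_elements_with_var_py; infer_instance

-- ===== CLAIM (what is proved, stated in full; the proofs are below) =====
def Claim_equal_num_elements_with_var_py : Prop := ∀ (variable_range : List (String × Int)) (element_conc : List (List (String × List String))), Dom_num_elements_with_var_py variable_range element_conc → Spec_num_elements_with_var_py variable_range element_conc (num_elements_with_var_py variable_range element_conc)

-- ===== LEMMAS AND PROOFS =====

-- fold over flatMap = nested folds
theorem pv_foldl_flatMap {α β σ : Type} (l : List α) (f : α → List β) (g : σ → β → σ) (a : σ) :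
    (l.flatMap f).foldl g a = l.foldl (fun a x => (f x).foldl g a) a := by
  induction l generalizing a with
  | nil => rfl
  | cons x t ih => simp [List.flatMap_cons, List.foldl_append, ih]

-- A's flattened event list: all (elem, conc) items, and per-variable hit count
def pvPairs (element_conc : List (List (String × List String))) : List (String × List String) :=
  element_conc.flatMap (fun be => (PySem.Dict.ofList be).items)

def pvCnt (element_conc : List (List (String × List String))) (k : String) : Int :=
  ((pvPairs element_conc).countP (fun p => decide (k ∈ p.2)) : Int)

-- A's inner scan at a fixed variable
theorem pvA_foldl_keys (var : String) (ps : List (String × List String)) (d : PySem.Dict String Int)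
    (h : var ∈ d.keys) :
    (ps.foldl (fun d p => if var ∈ p.2 then d.insert var (d.getD var 0 + 1) else d) d).keys = d.keys := by
  induction ps generalizing d with
  | nil => rfl
  | cons p t ih =>
    simp only [List.foldl_cons]
    by_cases hp : var ∈ p.2
    · have hc : d.contains var = true := (PySem.Dict.contains_iff_mem_keys d var).mpr h
      have hk : (d.insert var (d.getD var 0 + 1)).keys = d.keys :=
        PySem.Dict.keys_insert_of_contains _ _ (h := hc)
      rw [if_pos hp, ih _ (by rw [hk]; exact h), hk]
    · rw [if_neg hp, ih _ h]

theorem pvA_foldl_getD (var : String) (ps : List (String × List String)) (d : PySem.Dict String Int)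
    (h : var ∈ d.keys) (k : String) :
    (ps.foldl (fun d p => if var ∈ p.2 then d.insert var (d.getD var 0 + 1) else d) d).getD k 0 =
      d.getD k 0 + (if k = var then ((ps.countP (fun p => decide (var ∈ p.2))) : Int) else 0) := by
  induction ps generalizing d with
  | nil => simp
  | cons p t ih =>
    simp only [List.foldl_cons]
    by_cases hp : var ∈ p.2
    · have hc : d.contains var = true := (PySem.Dict.contains_iff_mem_keys d var).mpr h
      have hkeys : (d.insert var (d.getD var 0 + 1)).keys = d.keys :=
        PySem.Dict.keys_insert_of_contains _ _ (h := hc)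
      rw [if_pos hp, ih _ (by rw [hkeys]; exact h), PySem.Dict.getD_insert]
      by_cases hk : k = var
      · subst hk; simp [hp]; ring
      · simp [hk]
    · rw [if_neg hp, ih _ h]
      by_cases hk : k = var
      · subst hk; simp [hp]
      · simp [hk]

-- A's outer loop over a duplicate-free list of variables, all keys of d
theorem pvA_outer_keys (ec : List (List (String × List String))) (vars : List String)
    (d : PySem.Dict String Int) (h : ∀ v ∈ vars, v ∈ d.keys) :
    (vars.foldl (fun d var => (pvPairs ec).foldl
        (fun d p => if var ∈ p.2 then d.insert var (d.getD var 0 + 1) else d) d) d).keys = d.keys := by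
  induction vars generalizing d with
  | nil => rfl
  | cons v t ih =>
    simp only [List.foldl_cons]
    have hv : v ∈ d.keys := h v (by simp)
    have hk := pvA_foldl_keys v (pvPairs ec) d hv
    rw [ih _ (fun x hx => by rw [hk]; exact h x (by simp [hx])), hk]

theorem pvA_outer_getD (ec : List (List (String × List String))) (vars : List String)
    (d : PySem.Dict String Int) (h : ∀ v ∈ vars, v ∈ d.keys) (hnd : vars.Nodup) (k : String) :
    (vars.foldl (fun d var => (pvPairs ec).foldl
        (fun d p => if var ∈ p.2 then d.insert var (d.getD var 0 + 1) else d) d) d).getD k 0 =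
      d.getD k 0 + (if k ∈ vars then pvCnt ec k else 0) := by
  induction vars generalizing d with
  | nil => simp
  | cons v t ih =>
    simp only [List.foldl_cons]
    have hv : v ∈ d.keys := h v (by simp)
    have hk := pvA_foldl_keys v (pvPairs ec) d hv
    rw [ih _ (fun x hx => by rw [hk]; exact h x (by simp [hx])) hnd.of_cons,
        pvA_foldl_getD v (pvPairs ec) d hv]
    by_cases hkv : k = v
    · subst hkv
      have hnt : k ∉ t := (List.nodup_cons.mp hnd).1
      simp [hnt, pvCnt]
    · simp only [if_neg hkv, add_zero, List.mem_cons]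
      by_cases hkt : k ∈ t
      · simp [hkt, hkv]
      · simp [hkt, hkv]

-- B's flattened event list: every distinct member of every conc
def pvEvents (element_conc : List (List (String × List String))) : List String :=
  element_conc.flatMap (fun be => (PySem.Dict.ofList be).values.flatMap
    (fun conc => PySem.Set.ofList conc))

-- the tallies agree: B's event count at k = A's hit count at k
theorem pv_count_events (ec : List (List (String × List String))) (k : String) :
    ((pvEvents ec).count k : Int) = pvCnt ec k := by
  unfold pvEvents pvCnt pvPairs
  congr 1
  induction ec with
  | nil => rfl
  | cons be t ih =>
    simp only [List.flatMap_cons, List.count_append, List.countP_append, ih]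
    congr 1
    have : (PySem.Dict.ofList be).values = (PySem.Dict.ofList be).items.map (fun p => p.2) := rfl
    rw [this]
    generalize (PySem.Dict.ofList be).items = ps
    induction ps with
    | nil => rfl
    | cons p t2 ih2 =>
      simp only [List.map_cons, List.flatMap_cons, List.count_append, List.countP_cons, ih2]
      by_cases hm : k ∈ p.2
      · rw [List.count_eq_one_of_mem (PySem.Set.nodup_ofList _) ((PySem.Set.mem_ofList _ _).mpr hm)]
        simp [hm]; ring
      · rw [List.count_eq_zero.mpr (fun hc => hm ((PySem.Set.mem_ofList _ _).mp hc))]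
        simp [hm]

-- the init dict maps everything to 0 under default 0
theorem pv_init_getD (l : List String) (d : PySem.Dict String Int)
    (h : ∀ k, d.getD k 0 = 0) (k : String) :
    (l.foldl (fun d k => d.insert k 0) d).getD k 0 = 0 := by
  induction l generalizing d with
  | nil => exact h k
  | cons x t ih =>
    simp only [List.foldl_cons]
    exact ih _ (fun k' => by rw [PySem.Dict.getD_insert]; split <;> simp [h])

theorem pv_init_keys (l : List String) (hnd : l.Nodup) :
    ((l.foldl (fun d k => d.insert k 0) (PySem.Dict.empty : PySem.Dict String Int)).keys) = l := by
  rw [PySem.Dict.keys_foldl_insert (f := fun _ _ => (0 : Int))]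
  rw [PySem.Dict.keys_empty, PySem.Set.update_nil_left, PySem.Set.ofList_eq_self_of_nodup _ hnd]

-- main equality of the two ports: both equal K.map (fun k => (k, pvCnt ec k))
theorem pv_main (variable_range : List (String × Int)) (element_conc : List (List (String × List String))) :
    num_elements_with_var_py variable_range element_conc =
      num_elements_with_var_py_alt variable_range element_conc := by
  unfold num_elements_with_var_py num_elements_with_var_py_alt
  simp only [← pv_foldl_flatMap]
  set K := (PySem.Dict.ofList variable_range).keys with hKdef
  have hKnd : K.Nodup := PySem.Dict.nodup_keys_ofList _
  set init := K.foldl (fun d k => d.insert k 0) (PySem.Dict.empty : PySem.Dict String Int) with hinit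
  have hik : init.keys = K := pv_init_keys K hKnd
  have hi0 : ∀ k, init.getD k 0 = 0 :=
    pv_init_getD K PySem.Dict.empty (fun k => by rw [PySem.Dict.getD_empty])
  have hpairs : (element_conc.flatMap (fun be => (PySem.Dict.ofList be).items)) = pvPairs element_conc := rfl
  have hevents : (element_conc.flatMap (fun be => (PySem.Dict.ofList be).values.flatMap
      (fun conc => PySem.Set.ofList conc))) = pvEvents element_conc := rfl
  rw [hpairs, hevents]
  set dA := K.foldl (fun d var => (pvPairs element_conc).foldl
      (fun d p => if var ∈ p.2 then d.insert var (d.getD var 0 + 1) else d) d) init with hdA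
  have hAkeys : dA.keys = K := by rw [hdA, pvA_outer_keys _ _ _ (fun v hv => by rw [hik]; exact hv), hik]
  have hAex := PySem.Dict.items_eq_map_keys dA (by rw [hAkeys]; exact hKnd) 0
  rw [hAex, hAkeys]
  refine List.map_congr_left (fun k hk => ?_)
  have hA : dA.getD k 0 = pvCnt element_conc k := by
    rw [hdA, pvA_outer_getD _ _ _ (fun v hv => by rw [hik]; exact hv) hKnd, hi0]
    simp [hk]
  have hB : ((pvEvents element_conc).foldl
      (fun t member => t.insert member (t.getD member 0 + 1)) PySem.Dict.empty).getD k 0 =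
      pvCnt element_conc k := by
    rw [PySem.Dict.getD_foldl_insert_add_one, PySem.Dict.getD_empty, pv_count_events]
    ring
  rw [hA, hB]

-- ===== VERDICT (by name: the statement is the Claim_ definition above) =====
theorem num_elements_with_var_py_spec : Claim_equal_num_elements_with_var_py := by
  intro vr ec _
  unfold Spec_num_elements_with_var_py
  exact pv_main vr ec
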